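-- pv_equiv track=rewrite | github.com/LivingLogic/LivingLogic.Python.xist | _xist/xfind.py | item
-- ===== SOURCE A (Python) =====
-- import collections
--
-- _defaultitem = object()
--
-- def item(iterator, index, default=_defaultitem):
-- 	"""
-- 	<par>Return the <arg>index</arg>th item from the iterator <arg>iterator</arg>.
-- 	<arg>index</arg> must be an integer (negative integers are relative to the
-- 	end (i.e. the last item produced by the iterator)).</par>
--
-- 	<par>If <arg>default</arg> is given, this will be the default value when
-- 	the iterator doesn't contain an item at this position. Otherwise an
-- 	<class>IndexError</class> will be raised.</par>
-- 	"""
-- 	i = index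
-- 	if i>=0:
-- 		for item in iterator:
-- 			if not i:
-- 				return item
-- 			i -= 1
-- 	else:
-- 		i = -index
-- 		cache = collections.deque()
-- 		for item in iterator:
-- 			cache.append(item)
-- 			if len(cache)>i:
-- 				cache.popleft()
-- 		if len(cache)==i:
-- 			return cache.popleft()
-- 	if default is _defaultitem:
-- 		raise IndexError(index)
-- 	else:
-- 		return default
-- ===== SOURCE B (Python) =====
-- _defaultitem = object()
--
-- def item(iterator, index, default=_defaultitem):
--     items = list(iterator)
--     try:
--         return items[index]
--     except IndexError:
--         if default is _defaultitem:
--             raise IndexError(index)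
--         return default
-- ===== Notes on version B (the rewrite author's own statement) =====
-- stated objective: simpler
-- what changed: B materializes the iterator into a list and uses Python's native negative-aware indexing with a try/except fallback, replacing A's two-branch design (early-stop counting loop for nonnegative indices, bounded sliding-window deque for negative ones).
import Mathlib
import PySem

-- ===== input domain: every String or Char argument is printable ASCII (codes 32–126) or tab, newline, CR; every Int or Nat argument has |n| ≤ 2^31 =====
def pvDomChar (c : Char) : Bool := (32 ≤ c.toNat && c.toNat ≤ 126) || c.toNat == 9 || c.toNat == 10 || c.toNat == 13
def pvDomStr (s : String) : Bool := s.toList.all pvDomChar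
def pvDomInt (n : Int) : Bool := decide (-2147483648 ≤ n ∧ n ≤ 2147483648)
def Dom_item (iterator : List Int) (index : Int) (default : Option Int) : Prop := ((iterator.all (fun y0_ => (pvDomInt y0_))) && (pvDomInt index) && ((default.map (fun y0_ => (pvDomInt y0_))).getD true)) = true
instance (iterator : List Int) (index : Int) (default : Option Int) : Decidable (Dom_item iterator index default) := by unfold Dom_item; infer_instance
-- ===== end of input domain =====

-- B materializes the list and indexes it once with Python's negative-aware indexing,
-- replacing A's two-branch streaming design; equal return values on Pre_ (in-range index or a default given).


-- ===== PORT A =====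
-- the positive branch: walk the iterator counting i down; some = early return, none = loop exhausted
def itemLoopPos (l : List Int) (i : Nat) : Option Int :=
  match l, i with
  | [], _ => none
  | x :: _, 0 => some x
  | _ :: xs, n + 1 => itemLoopPos xs n

-- the negative branch's deque body: append, popleft when longer than i
def itemStep (i : Nat) (cache : List Int) (x : Int) : List Int :=
  let c := cache ++ [x]
  if c.length > i then c.drop 1 else c

def itemCache (l : List Int) (i : Nat) : List Int := l.foldl (itemStep i) []

-- fallthrough: A raises IndexError when no default (value irrelevant: Pre_ excludes it), else the default
def item (iterator : List Int) (index : Int) (default : Option Int) : Int :=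
  if index ≥ 0 then
    match itemLoopPos iterator index.toNat with
    | some v => v
    | none => default.getD 0
  else
    let i := (-index).toNat
    let cache := itemCache iterator i
    if cache.length = i then cache.headD 0
    else default.getD 0

-- ===== PORT B =====
def item_alt (iterator : List Int) (index : Int) (default : Option Int) : Int :=
  let items := iterator
  match PySem.List.pyGet? items index with
  | some v => v
  | none =>
    -- IndexError path: B re-raises when no default (value irrelevant: Pre_ excludes it), else the default
    default.getD 0

-- ===== PRECONDITION & SPEC =====
-- Pre_ excludes exactly the inputs on which A raises IndexError: index out of range with no default given.
def Pre_item (iterator : List Int) (index : Int) (default : Option Int) : Prop :=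
  default.isSome ∨ (-(iterator.length : Int) ≤ index ∧ index < iterator.length)
instance (iterator : List Int) (index : Int) (default : Option Int) : Decidable (Pre_item iterator index default) := by unfold Pre_item; infer_instance
def pvWitness_item : List Int × Int × Option Int := ([4, 5, 6], -1, none)

def Spec_item (iterator : List Int) (index : Int) (default : Option Int) (out : Int) : Prop := out = item_alt iterator index default
instance (iterator : List Int) (index : Int) (default : Option Int) (out : Int) : Decidable (Spec_item iterator index default out) := by unfold Spec_item; infer_instance

-- ===== CLAIM (what is proved, stated in full; the proofs are below) =====
def Claim_equal_item : Prop := ∀ (iterator : List Int) (index : Int) (default : Option Int), Dom_item iterator index default → Pre_item iterator index default → Spec_item iterator index default (item iterator index default)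

-- ===== LEMMAS AND PROOFS =====

theorem itemLoopPos_eq_get? (l : List Int) (i : Nat) : itemLoopPos l i = l[i]? := by
  induction l generalizing i with
  | nil => simp [itemLoopPos]
  | cons x xs ih => cases i <;> simp [itemLoopPos, ih]

theorem itemCache_aux (i : Nat) (l acc : List Int) (h : acc.length ≤ i) :
    List.foldl (itemStep i) acc l = (acc ++ l).drop ((acc ++ l).length - i) := by
  induction l generalizing acc with
  | nil => simp [show acc.length - i = 0 by omega]
  | cons x xs ih =>
    rw [List.foldl_cons]
    by_cases hc : (acc ++ [x]).length > i
    · have h1 : acc.length = i := by simp at hc; omega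
      have hstep : itemStep i acc x = (acc ++ [x]).drop 1 := by
        simp only [itemStep]; rw [if_pos hc]
      rw [hstep, ih _ (by simp; omega)]
      rw [← List.drop_append_of_le_length (by simp : 1 ≤ (acc ++ [x]).length)]
      rw [List.drop_drop]
      have e1 : acc ++ [x] ++ xs = acc ++ x :: xs := by simp
      rw [e1]
      congr 1
      simp
      omega
    · have hstep : itemStep i acc x = acc ++ [x] := by
        simp only [itemStep]; rw [if_neg hc]
      rw [hstep, ih _ (by simp at hc ⊢; omega)]
      have e1 : acc ++ [x] ++ xs = acc ++ x :: xs := by simp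
      rw [e1]

theorem itemCache_eq_drop (l : List Int) (i : Nat) :
    itemCache l i = l.drop (l.length - i) := by
  have := itemCache_aux i l [] (by simp)
  simpa [itemCache] using this

theorem item_spec' (iterator : List Int) (index : Int) (default : Option Int)
    (hp : Pre_item iterator index default) :
    item iterator index default = item_alt iterator index default := by
  simp only [item, item_alt]
  by_cases h0 : index ≥ 0
  · rw [if_pos h0, itemLoopPos_eq_get?,
      PySem.List.pyGet?_of_nonneg iterator h0]
  · rw [if_neg h0]
    simp only [itemCache_eq_drop]
    by_cases hin : (-index).toNat ≤ iterator.length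
    · -- in range: the cache holds exactly the last (-index).toNat elements
      have hk : 0 < (-index).toNat := by omega
      have hlen : (iterator.drop (iterator.length - (-index).toNat)).length = (-index).toNat := by
        simp; omega
      rw [if_pos hlen]
      have hidx : index = -(((-index).toNat : Nat) : Int) := by omega
      have hget : PySem.List.pyGet? iterator index
          = iterator[iterator.length - (-index).toNat]? := by
        conv_lhs => rw [hidx]
        exact PySem.List.pyGet?_neg_natCast iterator (-index).toNat hk hin
      rw [hget]
      have hne : iterator.length - (-index).toNat < iterator.length := by omega
      have hhead : (iterator.drop (iterator.length - (-index).toNat)).headD 0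
          = (iterator.drop (iterator.length - (-index).toNat))[0]?.getD 0 := by
        cases hdrop : iterator.drop (iterator.length - (-index).toNat) <;> simp
      rw [hhead, List.getElem?_drop, Nat.add_zero, List.getElem?_eq_getElem hne]
      rfl
    · -- out of range: both fall through to the default, which Pre_ forces to exist
      have hlen : (iterator.drop (iterator.length - (-index).toNat)).length ≠ (-index).toNat := by
        simp; omega
      rw [if_neg hlen]
      have hnone : PySem.List.pyGet? iterator index = none := by
        rw [PySem.List.pyGet?_eq_none_iff]
        unfold PySem.Raise.InRange
        omega
      rw [hnone]

-- ===== VERDICT (by name: the statement is the Claim_ definition above) =====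
theorem item_spec : Claim_equal_item := by
  intro iterator index default _ hp
  exact item_spec' iterator index default hp
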